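-- pv_equiv track=rewrite | github.com/arin17bishwa/myCP_sols | Leetcode/3676.py | bowlSubarrays
-- ===== SOURCE A (Python) =====
-- from typing import List
--
-- def bowlSubarrays(nums: List[int]) -> int:
--     arr = nums
--     n = len(arr)
--
--     left = [-1] * n
--     stack = []
--     for i in range(n):
--         while stack and arr[stack[-1]] < arr[i]:
--             stack.pop()
--         if stack:
--             left[i] = stack[-1]
--         stack.append(i)
--
--     right = [n] * n
--     stack = []
--     for i in range(n - 1, -1, -1):
--         while stack and arr[stack[-1]] < arr[i]:
--             stack.pop()
--         if stack:
--             right[i] = stack[-1]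
--         stack.append(i)
--     ans = 0
--     for i in range(n):
--         if left[i] != -1 and right[i] != n:
--             ans += 1
--     return ans
-- ===== SOURCE B (Python) =====
-- from typing import List
--
-- def bowlSubarrays(nums: List[int]) -> int:
--     # prefix-max / suffix-max formulation: an index qualifies iff some element
--     # >= nums[i] exists strictly on each side, i.e. nums[i] <= max(prefix) and
--     # nums[i] <= max(suffix).
--     n = len(nums)
--     if n < 3:
--         return 0
--     suf = [0] * n
--     m = nums[n - 1]
--     for i in range(n - 2, 0, -1):
--         suf[i] = m
--         if nums[i] > m:
--             m = nums[i]
--     ans = 0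
--     pre = nums[0]
--     for i in range(1, n - 1):
--         if nums[i] <= pre and nums[i] <= suf[i]:
--             ans += 1
--         if nums[i] > pre:
--             pre = nums[i]
--     return ans
-- ===== Notes on version B (the rewrite author's own statement) =====
-- stated objective: simpler
-- what changed: Replaces A's two monotonic-stack passes (plus left/right index arrays and a third counting loop) by a suffix-max array and a running prefix-max scalar: an index qualifies iff its value is <= the max before it and <= the max after it.
import Mathlib
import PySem

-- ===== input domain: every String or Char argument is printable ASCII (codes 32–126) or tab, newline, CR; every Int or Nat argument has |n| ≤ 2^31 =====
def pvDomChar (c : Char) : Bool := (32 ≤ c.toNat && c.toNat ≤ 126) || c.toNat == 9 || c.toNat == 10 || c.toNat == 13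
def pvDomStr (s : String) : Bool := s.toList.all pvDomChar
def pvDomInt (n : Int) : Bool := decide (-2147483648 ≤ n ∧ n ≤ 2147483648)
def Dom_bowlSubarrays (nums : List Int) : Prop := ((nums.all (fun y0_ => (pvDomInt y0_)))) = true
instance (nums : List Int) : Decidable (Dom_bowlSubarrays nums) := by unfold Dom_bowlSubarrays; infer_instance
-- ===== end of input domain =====

-- B replaces A's two monotonic-stack passes by prefix-max / suffix-max scans (simpler; same O(n) cost).

-- ===== PORT A =====
-- All indices reaching arr[...] come from range(...) over valid positions, so Python never
-- raises here; arr[j] is ported as pyGetD arr j 0 (exact on every index that actually occurs).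
-- The Python stack is ported with its TOP (Python stack[-1]) as the list HEAD.
def pvPop (arr : List Int) (v : Int) : List Int → List Int
  | [] => []
  | j :: rest => if PySem.List.pyGetD arr j 0 < v then pvPop arr v rest else j :: rest

-- one iteration of either stack loop (the two Python loop bodies are textually identical);
-- the loop index i is always ≥ 0, so the list write left[i] = j is ported via i.toNat.
def pvStep (arr : List Int) (st : List Int × List Int) (i : Int) : List Int × List Int :=
  let s := pvPop arr (PySem.List.pyGetD arr i 0) st.2
  (match s with
   | [] => st.1
   | j :: _ => st.1.set i.toNat j,
   i :: s)

def bowlSubarrays (nums : List Int) : Int :=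
  let arr := nums
  let n : Int := arr.length
  let left := ((PySem.List.pyRange 0 n).foldl (pvStep arr) (List.replicate arr.length (-1), [])).1
  let right := ((PySem.List.pyRange (n - 1) (-1) (-1)).foldl (pvStep arr) (List.replicate arr.length n, [])).1
  (PySem.List.pyRange 0 n).foldl
    (fun ans i =>
      if PySem.List.pyGetD left i 0 ≠ -1 ∧ PySem.List.pyGetD right i 0 ≠ n then ans + 1 else ans)
    0

-- ===== PORT B =====
-- suf[i] = m; if nums[i] > m: m = nums[i]
def pvSufStep (nums : List Int) (st : List Int × Int) (i : Int) : List Int × Int :=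
  (st.1.set i.toNat st.2,
   if st.2 < PySem.List.pyGetD nums i 0 then PySem.List.pyGetD nums i 0 else st.2)

-- if nums[i] <= pre and nums[i] <= suf[i]: ans += 1 ; if nums[i] > pre: pre = nums[i]
def pvCntStep (nums : List Int) (suf : List Int) (st : Int × Int) (i : Int) : Int × Int :=
  ((if PySem.List.pyGetD nums i 0 ≤ st.2 ∧ PySem.List.pyGetD nums i 0 ≤ PySem.List.pyGetD suf i 0
    then st.1 + 1 else st.1),
   if st.2 < PySem.List.pyGetD nums i 0 then PySem.List.pyGetD nums i 0 else st.2)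

def bowlSubarrays_alt (nums : List Int) : Int :=
  let n : Int := nums.length
  if n < 3 then 0
  else
    let suf := ((PySem.List.pyRange (n - 2) 0 (-1)).foldl (pvSufStep nums)
        (List.replicate nums.length 0, PySem.List.pyGetD nums (n - 1) 0)).1
    ((PySem.List.pyRange 1 (n - 1)).foldl (pvCntStep nums suf)
        (0, PySem.List.pyGetD nums 0 0)).1

-- ===== PRECONDITION & SPEC =====
def Spec_bowlSubarrays (nums : List Int) (out : Int) : Prop := out = bowlSubarrays_alt nums
instance (nums : List Int) (out : Int) : Decidable (Spec_bowlSubarrays nums out) := by unfold Spec_bowlSubarrays; infer_instance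

-- ===== CLAIM (what is proved, stated in full; the proofs are below) =====
def Claim_equal_bowlSubarrays : Prop := ∀ (nums : List Int), Dom_bowlSubarrays nums → Spec_bowlSubarrays nums (bowlSubarrays nums)

-- ===== LEMMAS AND PROOFS =====

-- "some earlier position holds a value ≥ arr[m]" / "some later position holds a value ≥ arr[m]"
def pvOkL (arr : List Int) (m : Nat) : Bool :=
  (List.range m).any (fun j => decide (arr.getD m 0 ≤ arr.getD j 0))
def pvOkR (arr : List Int) (m : Nat) : Bool :=
  (List.range arr.length).any (fun j => decide (m < j) && decide (arr.getD m 0 ≤ arr.getD j 0))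
def pvQ (arr : List Int) (m : Nat) : Bool := pvOkL arr m && pvOkR arr m

lemma pvOkL_iff (arr : List Int) (m : Nat) :
    pvOkL arr m = true ↔ ∃ j, j < m ∧ arr.getD m 0 ≤ arr.getD j 0 := by
  simp [pvOkL, List.any_eq_true, List.mem_range]

lemma pvOkR_iff (arr : List Int) (m : Nat) :
    pvOkR arr m = true ↔ ∃ j, m < j ∧ j < arr.length ∧ arr.getD m 0 ≤ arr.getD j 0 := by
  simp [pvOkR, List.any_eq_true, List.mem_range]; tauto

-- pvPop facts
lemma pvPop_sub (arr : List Int) (v : Int) :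
    ∀ s : List Int, ∀ j ∈ pvPop arr v s, j ∈ s := by
  intro s
  induction s with
  | nil => simp [pvPop]
  | cons a rest ih =>
    intro j hj
    by_cases h : PySem.List.pyGetD arr a 0 < v
    · simp only [pvPop, if_pos h] at hj
      exact List.mem_cons_of_mem _ (ih j hj)
    · simpa [pvPop, if_neg h] using hj

lemma pvPop_nil (arr : List Int) (v : Int) :
    ∀ s : List Int, pvPop arr v s = [] → ∀ j ∈ s, PySem.List.pyGetD arr j 0 < v := by
  intro s
  induction s with
  | nil => simp
  | cons a rest ih =>
    intro hnil j hj
    by_cases h : PySem.List.pyGetD arr a 0 < v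
    · simp only [pvPop, if_pos h] at hnil
      rcases List.mem_cons.1 hj with rfl | hj'
      · exact h
      · exact ih hnil j hj'
    · simp [pvPop, if_neg h] at hnil

lemma pvPop_cons (arr : List Int) (v : Int) :
    ∀ s : List Int, ∀ j t, pvPop arr v s = j :: t → v ≤ PySem.List.pyGetD arr j 0 ∧ j ∈ s := by
  intro s
  induction s with
  | nil => simp [pvPop]
  | cons a rest ih =>
    intro j t hp
    by_cases h : PySem.List.pyGetD arr a 0 < v
    · simp only [pvPop, if_pos h] at hp
      obtain ⟨h1, h2⟩ := ih j t hp
      exact ⟨h1, List.mem_cons_of_mem _ h2⟩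
    · simp only [pvPop, if_neg h] at hp
      cases hp
      exact ⟨le_of_not_gt h, List.mem_cons_self⟩

lemma pvPop_mem (arr : List Int) (v : Int) :
    ∀ s : List Int, ∀ j ∈ s, j ∈ pvPop arr v s ∨ PySem.List.pyGetD arr j 0 < v := by
  intro s
  induction s with
  | nil => simp
  | cons a rest ih =>
    intro j hj
    by_cases h : PySem.List.pyGetD arr a 0 < v
    · rcases List.mem_cons.1 hj with rfl | hj'
      · exact Or.inr h
      · simpa [pvPop, if_pos h] using ih j hj'
    · exact Or.inl (by simpa [pvPop, if_neg h] using hj)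

lemma getD_set_eq (l : List Int) (k : Nat) (v : Int) (h : k < l.length) :
    (l.set k v).getD k 0 = v := by
  simp [List.getD_eq_getElem?_getD, h]

lemma getD_set_ne (l : List Int) (k m : Nat) (v : Int) (h : k ≠ m) :
    (l.set k v).getD m 0 = l.getD m 0 := by
  simp [List.getD_eq_getElem?_getD, List.getElem?_set_ne h]

-- ascending pass: after processing indices k, k+1, …, n-1 the characterization holds
lemma pass_asc (arr : List Int) (dflt : Int)
    (hd : ∀ m : Nat, m < arr.length → (↑m : Int) ≠ dflt) :
    ∀ (c k : Nat), k + c = arr.length → ∀ (left stack : List Int),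
      left.length = arr.length →
      (∀ j ∈ stack, ∃ m : Nat, m < k ∧ j = (↑m : Int)) →
      (∀ m : Nat, m < k → ∃ j ∈ stack, arr.getD m 0 ≤ PySem.List.pyGetD arr j 0) →
      (∀ m : Nat, k ≤ m → m < arr.length → left.getD m 0 = dflt) →
      (∀ m : Nat, m < k → m < arr.length →
        (left.getD m 0 ≠ dflt ↔ ∃ j, j < m ∧ arr.getD m 0 ≤ arr.getD j 0)) →
      ∀ m : Nat, m < arr.length →
        (((List.range' k c).foldl (fun st (i : Nat) => pvStep arr st (↑i : Int)) (left, stack)).1.getD m 0 ≠ dflt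
          ↔ ∃ j, j < m ∧ arr.getD m 0 ≤ arr.getD j 0) := by
  intro c
  induction c with
  | zero =>
    intro k hk left stack hlen h2 h3 h4 h5 m hm
    simpa using h5 m (by omega) hm
  | succ c ih =>
    intro k hk left stack hlen h2 h3 h4 h5 m hm
    have hk' : k < arr.length := by omega
    have hval : PySem.List.pyGetD arr (↑k) 0 = arr.getD k 0 := PySem.List.pyGetD_natCast ..
    rw [List.range'_succ, List.foldl_cons]
    rcases hcase : pvPop arr (arr.getD k 0) stack with _ | ⟨j, t⟩
    · have hstep : pvStep arr (left, stack) (↑k) = (left, [(↑k : Int)]) := by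
        unfold pvStep
        rw [PySem.List.pyGetD_natCast, hcase]
      rw [hstep]
      refine ih (k + 1) (by omega) left [(↑k : Int)] hlen ?_ ?_ ?_ ?_ m hm
      · intro j hj
        rcases List.mem_singleton.1 hj with rfl
        exact ⟨k, by omega, rfl⟩
      · intro m' hm'
        rcases Nat.lt_succ_iff_lt_or_eq.1 hm' with h | rfl
        · obtain ⟨jj, hjj, hle⟩ := h3 m' h
          have hsm := pvPop_nil arr (arr.getD k 0) stack hcase jj hjj
          exact ⟨(↑k : Int), List.mem_singleton.2 rfl, by rw [hval]; omega⟩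
        · exact ⟨(↑m' : Int), List.mem_singleton.2 rfl, le_of_eq (PySem.List.pyGetD_natCast ..).symm⟩
      · intro m' hm' hmn'
        exact h4 m' (by omega) hmn'
      · intro m' hm' hmn'
        rcases Nat.lt_succ_iff_lt_or_eq.1 hm' with h | rfl
        · exact h5 m' h hmn'
        · rw [h4 m' (by omega) hmn']
          simp only [ne_eq, not_true_eq_false, false_iff]
          rintro ⟨j0, hj0, hle⟩
          obtain ⟨jj, hjj, hle2⟩ := h3 j0 hj0
          have hsm := pvPop_nil arr (arr.getD m' 0) stack hcase jj hjj
          omega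
    · obtain ⟨hvj, hjmem⟩ := pvPop_cons arr (arr.getD k 0) stack j t hcase
      obtain ⟨mj, hmjk, rfl⟩ := h2 j hjmem
      have hstep : pvStep arr (left, stack) (↑k) = (left.set k (↑mj), (↑k : Int) :: (↑mj : Int) :: t) := by
        unfold pvStep
        rw [PySem.List.pyGetD_natCast, hcase]
        simp
      rw [hstep]
      refine ih (k + 1) (by omega) _ _ (by simp [hlen]) ?_ ?_ ?_ ?_ m hm
      · intro j' hj'
        rcases List.mem_cons.1 hj' with rfl | hj''
        · exact ⟨k, by omega, rfl⟩
        · obtain ⟨m', hm', rfl⟩ := h2 j' (pvPop_sub arr (arr.getD k 0) stack j' (hcase ▸ hj''))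
          exact ⟨m', by omega, rfl⟩
      · intro m' hm'
        rcases Nat.lt_succ_iff_lt_or_eq.1 hm' with h | rfl
        · obtain ⟨jj, hjj, hle⟩ := h3 m' h
          rcases pvPop_mem arr (arr.getD k 0) stack jj hjj with hin | hlt
          · exact ⟨jj, List.mem_cons_of_mem _ (hcase ▸ hin), hle⟩
          · exact ⟨(↑k : Int), List.mem_cons_self, by rw [hval]; omega⟩
        · exact ⟨(↑mj : Int), List.mem_cons_of_mem _ List.mem_cons_self, hvj⟩
      · intro m' hm' hmn'
        rw [getD_set_ne left k m' _ (by omega)]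
        exact h4 m' (by omega) hmn'
      · intro m' hm' hmn'
        rcases Nat.lt_succ_iff_lt_or_eq.1 hm' with h | rfl
        · rw [getD_set_ne left k m' _ (by omega)]
          exact h5 m' h hmn'
        · rw [getD_set_eq left m' _ (by omega)]
          refine iff_of_true (hd mj (by omega)) ⟨mj, by omega, ?_⟩
          calc arr.getD m' 0 ≤ PySem.List.pyGetD arr (↑mj) 0 := hvj
            _ = arr.getD mj 0 := PySem.List.pyGetD_natCast ..

-- descending pass: after processing indices k-1, k-2, …, 0 the characterization holds
lemma pass_desc (arr : List Int) (dflt : Int)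
    (hd : ∀ m : Nat, m < arr.length → (↑m : Int) ≠ dflt) :
    ∀ (k : Nat), k ≤ arr.length → ∀ (left stack : List Int),
      left.length = arr.length →
      (∀ j ∈ stack, ∃ m : Nat, k ≤ m ∧ m < arr.length ∧ j = (↑m : Int)) →
      (∀ m : Nat, k ≤ m → m < arr.length → ∃ j ∈ stack, arr.getD m 0 ≤ PySem.List.pyGetD arr j 0) →
      (∀ m : Nat, m < k → left.getD m 0 = dflt) →
      (∀ m : Nat, k ≤ m → m < arr.length →
        (left.getD m 0 ≠ dflt ↔ ∃ j, m < j ∧ j < arr.length ∧ arr.getD m 0 ≤ arr.getD j 0)) →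
      ∀ m : Nat, m < arr.length →
        ((((List.range k).reverse).foldl (fun st (i : Nat) => pvStep arr st (↑i : Int)) (left, stack)).1.getD m 0 ≠ dflt
          ↔ ∃ j, m < j ∧ j < arr.length ∧ arr.getD m 0 ≤ arr.getD j 0) := by
  intro k
  induction k with
  | zero =>
    intro hk left stack hlen h2 h3 h4 h5 m hm
    simpa using h5 m (Nat.zero_le m) hm
  | succ k ih =>
    intro hk left stack hlen h2 h3 h4 h5 m hm
    have hk' : k < arr.length := by omega
    have hval : PySem.List.pyGetD arr (↑k) 0 = arr.getD k 0 := PySem.List.pyGetD_natCast ..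
    have hrev : (List.range (k + 1)).reverse = k :: (List.range k).reverse := by
      simp [List.range_succ]
    rw [hrev, List.foldl_cons]
    rcases hcase : pvPop arr (arr.getD k 0) stack with _ | ⟨j, t⟩
    · have hstep : pvStep arr (left, stack) (↑k) = (left, [(↑k : Int)]) := by
        unfold pvStep
        rw [PySem.List.pyGetD_natCast, hcase]
      rw [hstep]
      refine ih (by omega) left [(↑k : Int)] hlen ?_ ?_ ?_ ?_ m hm
      · intro j hj
        rcases List.mem_singleton.1 hj with rfl
        exact ⟨k, le_refl k, hk', rfl⟩
      · intro m' hm'1 hm'2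
        rcases Nat.eq_or_lt_of_le hm'1 with h | h
        · cases h
          exact ⟨(↑k : Int), List.mem_singleton.2 rfl, le_of_eq (PySem.List.pyGetD_natCast ..).symm⟩
        · obtain ⟨jj, hjj, hle⟩ := h3 m' (by omega) hm'2
          have hsm := pvPop_nil arr (arr.getD k 0) stack hcase jj hjj
          exact ⟨(↑k : Int), List.mem_singleton.2 rfl, by rw [hval]; omega⟩
      · intro m' hm'
        exact h4 m' (by omega)
      · intro m' hm'1 hm'2
        rcases Nat.eq_or_lt_of_le hm'1 with h | h
        · cases h
          rw [h4 k (by omega)]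
          simp only [ne_eq, not_true_eq_false, false_iff]
          rintro ⟨j0, hj0a, hj0b, hle⟩
          obtain ⟨jj, hjj, hle2⟩ := h3 j0 (by omega) hj0b
          have hsm := pvPop_nil arr (arr.getD k 0) stack hcase jj hjj
          omega
        · exact h5 m' (by omega) hm'2
    · obtain ⟨hvj, hjmem⟩ := pvPop_cons arr (arr.getD k 0) stack j t hcase
      obtain ⟨mj, hmj1, hmj2, rfl⟩ := h2 j hjmem
      have hstep : pvStep arr (left, stack) (↑k) = (left.set k (↑mj), (↑k : Int) :: (↑mj : Int) :: t) := by
        unfold pvStep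
        rw [PySem.List.pyGetD_natCast, hcase]
        simp
      rw [hstep]
      refine ih (by omega) _ _ (by simp [hlen]) ?_ ?_ ?_ ?_ m hm
      · intro j' hj'
        rcases List.mem_cons.1 hj' with rfl | hj''
        · exact ⟨k, le_refl k, hk', rfl⟩
        · obtain ⟨m', hm'1, hm'2, rfl⟩ := h2 j' (pvPop_sub arr (arr.getD k 0) stack j' (hcase ▸ hj''))
          exact ⟨m', by omega, hm'2, rfl⟩
      · intro m' hm'1 hm'2
        rcases Nat.eq_or_lt_of_le hm'1 with h | h
        · cases h
          exact ⟨(↑mj : Int), List.mem_cons_of_mem _ List.mem_cons_self, hvj⟩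
        · obtain ⟨jj, hjj, hle⟩ := h3 m' (by omega) hm'2
          rcases pvPop_mem arr (arr.getD k 0) stack jj hjj with hin | hlt
          · exact ⟨jj, List.mem_cons_of_mem _ (hcase ▸ hin), hle⟩
          · exact ⟨(↑k : Int), List.mem_cons_self, by rw [hval]; omega⟩
      · intro m' hm'
        rw [getD_set_ne left k m' _ (by omega)]
        exact h4 m' (by omega)
      · intro m' hm'1 hm'2
        rcases Nat.eq_or_lt_of_le hm'1 with h | h
        · cases h
          rw [getD_set_eq left k _ (by omega)]
          refine iff_of_true (hd mj hmj2) ⟨mj, by omega, hmj2, ?_⟩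
          calc arr.getD k 0 ≤ PySem.List.pyGetD arr (↑mj) 0 := hvj
            _ = arr.getD mj 0 := PySem.List.pyGetD_natCast ..
        · rw [getD_set_ne left k m' _ (by omega)]
          exact h5 m' (by omega) hm'2

lemma pyRange_down (n : Nat) :
    PySem.List.pyRange (↑n - 1) (-1) (-1) = ((List.range n).reverse).map (fun m : Nat => (↑m : Int)) := by
  induction n with
  | zero => simp
  | succ n ih =>
    have h1 : ((↑(n + 1) : Int) - 1) = ↑n := by omega
    rw [h1, PySem.List.pyRange_neg_one_cons (by omega), List.range_succ]
    simp only [List.reverse_append, List.reverse_singleton, List.singleton_append, List.map_cons]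
    rw [← ih]

lemma pyRange_down1 (k : Nat) :
    PySem.List.pyRange (↑k) 0 (-1) = ((List.range' 1 k).reverse).map (fun m : Nat => (↑m : Int)) := by
  induction k with
  | zero => simp
  | succ k ih =>
    rw [PySem.List.pyRange_neg_one_cons (by omega), List.range'_concat]
    have h1 : ((↑(k + 1) : Int) - 1) = ↑k := by omega
    have h2 : 1 + 1 * k = k + 1 := by omega
    rw [h1, h2]
    simp only [List.reverse_append, List.reverse_singleton, List.singleton_append, List.map_cons]
    rw [← ih]

-- characterization of A's `left` array
lemma left_char (arr : List Int) (m : Nat) (hm : m < arr.length) :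
    ((((PySem.List.pyRange 0 (arr.length : Int)).foldl (pvStep arr) (List.replicate arr.length (-1), ([] : List Int))).1).getD m 0 ≠ -1)
      ↔ pvOkL arr m = true := by
  rw [PySem.List.pyRange_zero_nat, List.foldl_map, List.range_eq_range', pvOkL_iff]
  exact pass_asc arr (-1) (fun m _ => by omega) arr.length 0 (by omega) _ _ (by simp) (by simp)
    (fun m hm => absurd hm (by omega)) (fun m _ _ => List.getD_replicate _ (by omega))
    (fun m hm => absurd hm (by omega)) m hm

-- characterization of A's `right` array
lemma right_char (arr : List Int) (m : Nat) (hm : m < arr.length) :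
    ((((PySem.List.pyRange ((arr.length : Int) - 1) (-1) (-1)).foldl (pvStep arr) (List.replicate arr.length ((arr.length : Int)), ([] : List Int))).1).getD m 0 ≠ (arr.length : Int))
      ↔ pvOkR arr m = true := by
  rw [pyRange_down, List.foldl_map, pvOkR_iff]
  exact pass_desc arr (arr.length : Int) (fun m hm => by omega) arr.length (le_refl _) _ _ (by simp) (by simp)
    (fun m h1 h2 => absurd h2 (by omega)) (fun m _ => List.getD_replicate _ (by omega))
    (fun m h1 h2 => absurd h2 (by omega)) m hm

lemma count_fold (arr L R : List Int)
    (hL : ∀ m : Nat, m < arr.length → (L.getD m 0 ≠ -1 ↔ pvOkL arr m = true))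
    (hR : ∀ m : Nat, m < arr.length → (R.getD m 0 ≠ (arr.length : Int) ↔ pvOkR arr m = true)) :
    (PySem.List.pyRange 0 (arr.length : Int)).foldl
        (fun ans i => if PySem.List.pyGetD L i 0 ≠ -1 ∧ PySem.List.pyGetD R i 0 ≠ (arr.length : Int) then ans + 1 else ans) 0
      = ((List.range arr.length).countP (pvQ arr) : Int) := by
  rw [PySem.List.pyRange_zero_nat, List.foldl_map]
  have hfg : ∀ (acc : Int), ∀ x ∈ List.range arr.length,
      (if PySem.List.pyGetD L (↑x) 0 ≠ -1 ∧ PySem.List.pyGetD R (↑x) 0 ≠ (arr.length : Int) then acc + 1 else acc)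
        = (if pvQ arr x = true then acc + 1 else acc) := by
    intro acc m hm
    have hm' := List.mem_range.1 hm
    have hiff : (PySem.List.pyGetD L (↑m) 0 ≠ -1 ∧ PySem.List.pyGetD R (↑m) 0 ≠ (arr.length : Int)) ↔ (pvQ arr m = true) := by
      rw [PySem.List.pyGetD_natCast, PySem.List.pyGetD_natCast, pvQ, Bool.and_eq_true]
      exact and_congr (hL m hm') (hR m hm')
    exact if_congr hiff rfl rfl
  rw [PySem.List.foldl_congr_mem _ _ _ _ hfg, PySem.List.foldl_count_if]
  simp

-- A computes the number of indices with a ≥-element on both sides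
lemma A_eq_count (arr : List Int) :
    bowlSubarrays arr = ((List.range arr.length).countP (pvQ arr) : Int) := by
  simp only [bowlSubarrays]
  exact count_fold arr _ _ (left_char arr) (right_char arr)

-- maxima of a prefix / suffix of arr, stated as propositions
def pvMaxTo (arr : List Int) (t : Nat) (v : Int) : Prop :=
  (∃ j, j < t ∧ arr.getD j 0 = v) ∧ ∀ j, j < t → arr.getD j 0 ≤ v
def pvMaxFrom (arr : List Int) (t : Nat) (v : Int) : Prop :=
  (∃ j, t ≤ j ∧ j < arr.length ∧ arr.getD j 0 = v) ∧
    ∀ j, t ≤ j → j < arr.length → arr.getD j 0 ≤ v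

lemma suf_go (arr : List Int) :
    ∀ (k : Nat), k ≤ arr.length - 2 → ∀ (suf : List Int) (m : Int),
      suf.length = arr.length → pvMaxFrom arr (k + 1) m →
      (∀ i, k < i → i ≤ arr.length - 2 → pvMaxFrom arr (i + 1) (suf.getD i 0)) →
      ∀ i, 1 ≤ i → i ≤ arr.length - 2 →
        pvMaxFrom arr (i + 1)
          (((((List.range' 1 k).reverse).map (fun m : Nat => (↑m : Int))).foldl (pvSufStep arr) (suf, m)).1.getD i 0) := by
  intro k
  induction k with
  | zero =>
    intro hk suf m hlen hmax hpart i h1 h2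
    simpa using hpart i (by omega) h2
  | succ k ih =>
    intro hk suf m hlen hmax hpart i h1 h2
    have hrev : (List.range' 1 (k + 1)).reverse = (k + 1) :: (List.range' 1 k).reverse := by
      rw [List.range'_concat]
      simp [Nat.add_comm]
    rw [hrev]
    simp only [List.map_cons, List.foldl_cons]
    have hk1 : k + 1 < arr.length := by omega
    have hstep : pvSufStep arr (suf, m) (↑(k + 1) : Int)
        = (suf.set (k + 1) m, if m < arr.getD (k + 1) 0 then arr.getD (k + 1) 0 else m) := by
      unfold pvSufStep
      rw [PySem.List.pyGetD_natCast]
      simp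
    rw [hstep]
    refine ih (by omega) _ _ (by simp [hlen]) ?_ ?_ i h1 h2
    · split_ifs with hlt
      · refine ⟨⟨k + 1, le_refl _, hk1, rfl⟩, ?_⟩
        intro j hj1 hj2
        by_cases hj : j = k + 1
        · subst hj; exact le_refl _
        · exact le_trans (hmax.2 j (by omega) hj2) (le_of_lt hlt)
      · obtain ⟨⟨j0, hj0a, hj0b, hj0c⟩, hub⟩ := hmax
        refine ⟨⟨j0, by omega, hj0b, hj0c⟩, ?_⟩
        intro j hj1 hj2
        by_cases hj : j = k + 1
        · subst hj; omega
        · exact hub j (by omega) hj2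
    · intro i' hi1 hi2
      by_cases hj : i' = k + 1
      · subst hj
        rw [getD_set_eq _ _ _ (by omega)]
        exact hmax
      · rw [getD_set_ne _ _ _ _ (by omega)]
        exact hpart i' (by omega) hi2

lemma cnt_go (arr suf : List Int) (hs : ∀ i, 1 ≤ i → i ≤ arr.length - 2 → pvMaxFrom arr (i + 1) (suf.getD i 0)) :
    ∀ (c t : Nat), t + c = arr.length - 1 → 1 ≤ t → ∀ (ans pre : Int),
      pvMaxTo arr t pre →
      (((List.range' t c).map (fun m : Nat => (↑m : Int))).foldl (pvCntStep arr suf) (ans, pre)).1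
        = ans + ((List.range' t c).countP (pvQ arr) : Int) := by
  intro c
  induction c with
  | zero =>
    intro t ht h1t ans pre hpre
    simp
  | succ c ih =>
    intro t ht h1t ans pre hpre
    rw [List.range'_succ]
    simp only [List.map_cons, List.foldl_cons]
    have htlen : t < arr.length := by omega
    have hstep : pvCntStep arr suf (ans, pre) (↑t : Int)
        = ((if arr.getD t 0 ≤ pre ∧ arr.getD t 0 ≤ suf.getD t 0 then ans + 1 else ans),
           (if pre < arr.getD t 0 then arr.getD t 0 else pre)) := by
      unfold pvCntStep
      rw [PySem.List.pyGetD_natCast, PySem.List.pyGetD_natCast]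
    rw [hstep]
    have hsuft := hs t h1t (by omega)
    have hcond : (arr.getD t 0 ≤ pre ∧ arr.getD t 0 ≤ suf.getD t 0) ↔ pvQ arr t = true := by
      rw [pvQ, Bool.and_eq_true, pvOkL_iff, pvOkR_iff]
      refine and_congr ⟨?_, ?_⟩ ⟨?_, ?_⟩
      · intro h
        obtain ⟨j0, hj0, he⟩ := hpre.1
        exact ⟨j0, hj0, by omega⟩
      · rintro ⟨j, hj, hle⟩
        exact le_trans hle (hpre.2 j hj)
      · intro h
        obtain ⟨⟨j0, hj0a, hj0b, he⟩, _⟩ := hsuft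
        exact ⟨j0, by omega, hj0b, by omega⟩
      · rintro ⟨j, hj1, hj2, hle⟩
        exact le_trans hle (hsuft.2 j (by omega) hj2)
    have hpre' : pvMaxTo arr (t + 1) (if pre < arr.getD t 0 then arr.getD t 0 else pre) := by
      split_ifs with hlt
      · refine ⟨⟨t, by omega, rfl⟩, ?_⟩
        intro j hj
        by_cases hjt : j = t
        · subst hjt; exact le_refl _
        · exact le_trans (hpre.2 j (by omega)) (le_of_lt hlt)
      · obtain ⟨⟨j0, hj0, he⟩, hub⟩ := hpre
        refine ⟨⟨j0, by omega, he⟩, ?_⟩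
        intro j hj
        by_cases hjt : j = t
        · subst hjt; omega
        · exact hub j (by omega)
    rw [ih (t + 1) (by omega) (by omega) _ _ hpre', List.countP_cons]
    by_cases hq : pvQ arr t = true
    · rw [if_pos (hcond.2 hq), if_pos hq]
      omega
    · rw [if_neg (fun hc => hq (hcond.1 hc)), if_neg hq]
      omega

lemma pyRange_up1 (b : Nat) :
    PySem.List.pyRange 1 (↑b) = ((List.range' 1 (b - 1)).map (fun m : Nat => (↑m : Int))) := by
  rw [PySem.List.pyRange_one]
  have h1 : ((b : Int) - 1).toNat = b - 1 := by omega
  rw [h1]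
  simp only [List.range'_eq_map_range, List.map_map]
  refine List.map_congr_left (fun x _ => ?_)
  simp

lemma count_trim (arr : List Int) (h : 3 ≤ arr.length) :
    (List.range arr.length).countP (pvQ arr) = (List.range' 1 (arr.length - 2)).countP (pvQ arr) := by
  have h0 : pvQ arr 0 = false := by simp [pvQ, pvOkL]
  have hl : pvOkR arr (arr.length - 1) = false := by
    rw [Bool.eq_false_iff]
    intro hx
    rw [pvOkR_iff] at hx
    obtain ⟨j, hj1, hj2, _⟩ := hx
    omega
  have hq1 : pvQ arr (arr.length - 1) = false := by simp [pvQ, hl]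
  obtain ⟨c, hc⟩ : ∃ c, arr.length = c + 2 := ⟨arr.length - 2, by omega⟩
  have hq1' : pvQ arr (1 + c) = false := by
    have e : 1 + c = arr.length - 1 := by omega
    rw [e, hq1]
  rw [List.range_eq_range', hc]
  have h2 : c + 2 - 2 = c := by omega
  rw [h2, show c + 2 = (c + 1) + 1 from rfl, List.range'_succ, List.range'_concat]
  simp [List.countP_append, h0, hq1']

lemma B_eq_count (arr : List Int) :
    bowlSubarrays_alt arr = ((List.range arr.length).countP (pvQ arr) : Int) := by
  simp only [bowlSubarrays_alt]
  by_cases h3 : (arr.length : Int) < 3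
  · rw [if_pos h3]
    have hz : ∀ m ∈ List.range arr.length, ¬(pvQ arr m = true) := by
      intro m hm
      rw [pvQ, Bool.and_eq_true, pvOkL_iff, pvOkR_iff]
      rintro ⟨⟨j1, hj1, _⟩, ⟨j2, hj2a, hj2b, _⟩⟩
      have := List.mem_range.1 hm
      omega
    rw [List.countP_eq_zero.2 hz]
    simp
  · rw [if_neg h3]
    have hn : 3 ≤ arr.length := by omega
    have e2 : ((arr.length : Int) - 2) = ↑(arr.length - 2) := by omega
    have e1 : ((arr.length : Int) - 1) = ↑(arr.length - 1) := by omega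
    rw [e2, e1, pyRange_down1, pyRange_up1, PySem.List.pyGetD_natCast, PySem.List.pyGetD_ofNat']
    have hm0 : pvMaxFrom arr ((arr.length - 2) + 1) (arr.getD (arr.length - 1) 0) := by
      refine ⟨⟨arr.length - 1, by omega, by omega, rfl⟩, ?_⟩
      intro j hj1 hj2
      have : j = arr.length - 1 := by omega
      subst this
      exact le_refl _
    have hsufOK := suf_go arr (arr.length - 2) (le_refl _) (List.replicate arr.length 0)
      (arr.getD (arr.length - 1) 0) (by simp) hm0 (fun i hi1 hi2 => absurd hi1 (by omega))
    have e3 : arr.length - 1 - 1 = arr.length - 2 := by omega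
    rw [e3]
    have hpre0 : pvMaxTo arr 1 (arr.getD 0 0) := by
      refine ⟨⟨0, by omega, rfl⟩, ?_⟩
      intro j hj
      have : j = 0 := by omega
      subst this
      exact le_refl _
    rw [cnt_go arr _ hsufOK (arr.length - 2) 1 (by omega) (by omega) 0 _ hpre0, count_trim arr hn]
    ring

-- ===== VERDICT (by name: the statement is the Claim_ definition above) =====
theorem bowlSubarrays_spec : Claim_equal_bowlSubarrays := by
  intro nums _
  unfold Spec_bowlSubarrays
  rw [A_eq_count, B_eq_count]
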